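-- pv_equiv track=rewrite | github.com/genomehubs/cli-generator | tests/python/test_core.py | _minimal_msearch_response
-- ===== SOURCE A (Python) =====
-- def _minimal_msearch_response(entries: list[tuple[int, int]]) -> str:
--     """Build a minimal /msearch batch response string.
--
--     Each ``(taxon_id, total)`` pair becomes one element in ``results``.
--     """
--     overall = sum(t for _, t in entries)
--     results = []
--     for taxon_id, total in entries:
--         results.append(
--             f'{{"status":"ok","count":1,"total":{total},'
--             f'"hits":[{{"index":"taxon--ncbi","id":"{taxon_id}","score":1.0,'
--             f'"result":{{"taxon_id":"{taxon_id}","scientific_name":"Species {taxon_id}",'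
--             f'"taxon_rank":"species","fields":{{}}}}}}]}}'
--         )
--     return f'{{"status":{{"hits":{overall},"success":true}},' f'"results":[{",".join(results)}]}}'
-- ===== SOURCE B (Python) =====
-- def _minimal_msearch_response(entries: list[tuple[int, int]]) -> str:
--     """Build a minimal /msearch batch response via a tiny JSON-object serializer."""
--
--     def obj(pairs):
--         return "{" + ",".join('"%s":%s' % kv for kv in pairs) + "}"
--
--     def q(x):
--         return '"%s"' % x
--
--     results = [
--         obj([
--             ("status", q("ok")),
--             ("count", "1"),
--             ("total", str(total)),
--             ("hits", "[" + obj([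
--                 ("index", q("taxon--ncbi")),
--                 ("id", q(taxon_id)),
--                 ("score", "1.0"),
--                 ("result", obj([
--                     ("taxon_id", q(taxon_id)),
--                     ("scientific_name", q("Species %s" % taxon_id)),
--                     ("taxon_rank", q("species")),
--                     ("fields", obj([])),
--                 ])),
--             ]) + "]"),
--         ])
--         for taxon_id, total in entries
--     ]
--     return obj([
--         ("status", obj([("hits", str(sum(t for _, t in entries))), ("success", "true")])),
--         ("results", "[" + ",".join(results) + "]"),
--     ])
-- ===== Notes on version B (the rewrite author's own statement) =====
-- stated objective: alternative
-- what changed: B replaces A's hand-written f-string templates and manual result join by a tiny generic JSON-object serializer (obj/q helpers) fed with (key, rendered-value) pair lists, building the response from data rather than inline string templates.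
import Mathlib
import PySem

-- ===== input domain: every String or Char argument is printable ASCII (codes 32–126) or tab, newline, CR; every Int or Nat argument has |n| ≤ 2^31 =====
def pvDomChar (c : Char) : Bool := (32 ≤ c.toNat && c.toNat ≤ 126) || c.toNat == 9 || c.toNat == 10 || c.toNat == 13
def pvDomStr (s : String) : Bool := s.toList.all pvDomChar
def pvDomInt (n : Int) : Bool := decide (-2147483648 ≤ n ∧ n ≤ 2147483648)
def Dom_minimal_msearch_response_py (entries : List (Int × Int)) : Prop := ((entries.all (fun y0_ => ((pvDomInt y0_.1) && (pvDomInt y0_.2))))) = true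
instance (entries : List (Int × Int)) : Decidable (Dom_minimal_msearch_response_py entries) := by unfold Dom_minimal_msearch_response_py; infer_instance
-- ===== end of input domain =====

-- B replaces A's hand-written f-string templates and manual join by a tiny generic
-- JSON-object serializer fed with (key, rendered value) pairs (objective: alternative).

-- ===== PORT A =====
-- literal transliteration of A: f-strings become concatenations of the same pieces,
-- the results-appending loop becomes a foldl over the same list accumulator
def minimal_msearch_response_py (entries : List (Int × Int)) : String :=
  let overall : Int := (entries.map (fun p => p.2)).sum
  let results : List String := entries.foldl (fun acc p =>
    acc ++ ["{\"status\":\"ok\",\"count\":1,\"total\":" ++ PySem.Int.toStr p.2 ++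
      ",\"hits\":[{\"index\":\"taxon--ncbi\",\"id\":\"" ++ PySem.Int.toStr p.1 ++
      "\",\"score\":1.0,\"result\":{\"taxon_id\":\"" ++ PySem.Int.toStr p.1 ++
      "\",\"scientific_name\":\"Species " ++ PySem.Int.toStr p.1 ++
      "\",\"taxon_rank\":\"species\",\"fields\":{}}}]}"]) []
  "{\"status\":{\"hits\":" ++ PySem.Int.toStr overall ++ ",\"success\":true},\"results\":[" ++
    PySem.Str.join "," results ++ "]}"

-- ===== PORT B =====
-- obj(pairs): '{' + ','.join('"k":v') + '}'
def pvObj (pairs : List (String × String)) : String :=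
  "{" ++ PySem.Str.join "," (pairs.map (fun kv => "\"" ++ kv.1 ++ "\":" ++ kv.2)) ++ "}"

-- q(x): '"x"'
def pvQ (x : String) : String := "\"" ++ x ++ "\""

def minimal_msearch_response_py_alt (entries : List (Int × Int)) : String :=
  let results : List String := entries.map (fun p =>
    pvObj [("status", pvQ "ok"), ("count", "1"), ("total", PySem.Int.toStr p.2),
      ("hits", "[" ++ pvObj [("index", pvQ "taxon--ncbi"), ("id", pvQ (PySem.Int.toStr p.1)),
        ("score", "1.0"),
        ("result", pvObj [("taxon_id", pvQ (PySem.Int.toStr p.1)),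
          ("scientific_name", pvQ ("Species " ++ PySem.Int.toStr p.1)),
          ("taxon_rank", pvQ "species"), ("fields", pvObj [])])] ++ "]")])
  pvObj [("status", pvObj [("hits", PySem.Int.toStr ((entries.map (fun p => p.2)).sum)),
      ("success", "true")]),
    ("results", "[" ++ PySem.Str.join "," results ++ "]")]

-- ===== PRECONDITION & SPEC =====
def Spec_minimal_msearch_response_py (entries : List (Int × Int)) (out : String) : Prop := out = minimal_msearch_response_py_alt entries
instance (entries : List (Int × Int)) (out : String) : Decidable (Spec_minimal_msearch_response_py entries out) := by unfold Spec_minimal_msearch_response_py; infer_instance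

-- ===== CLAIM (what is proved, stated in full; the proofs are below) =====
def Claim_equal_minimal_msearch_response_py : Prop := ∀ (entries : List (Int × Int)), Dom_minimal_msearch_response_py entries → Spec_minimal_msearch_response_py entries (minimal_msearch_response_py entries)

-- ===== LEMMAS AND PROOFS =====
-- A's per-entry f-string equals B's per-entry serialized object
set_option maxRecDepth 4096 in
theorem pv_elem_eq (p : Int × Int) :
    "{\"status\":\"ok\",\"count\":1,\"total\":" ++ PySem.Int.toStr p.2 ++
      ",\"hits\":[{\"index\":\"taxon--ncbi\",\"id\":\"" ++ PySem.Int.toStr p.1 ++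
      "\",\"score\":1.0,\"result\":{\"taxon_id\":\"" ++ PySem.Int.toStr p.1 ++
      "\",\"scientific_name\":\"Species " ++ PySem.Int.toStr p.1 ++
      "\",\"taxon_rank\":\"species\",\"fields\":{}}}]}" =
    pvObj [("status", pvQ "ok"), ("count", "1"), ("total", PySem.Int.toStr p.2),
      ("hits", "[" ++ pvObj [("index", pvQ "taxon--ncbi"), ("id", pvQ (PySem.Int.toStr p.1)),
        ("score", "1.0"),
        ("result", pvObj [("taxon_id", pvQ (PySem.Int.toStr p.1)),
          ("scientific_name", pvQ ("Species " ++ PySem.Int.toStr p.1)),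
          ("taxon_rank", pvQ "species"), ("fields", pvObj [])])] ++ "]")] := by
  apply String.ext
  simp [pvObj, pvQ, PySem.Str.join, PySem.Chars.join_cons_cons, PySem.Chars.join_singleton]

-- ===== VERDICT (by name: the statement is the Claim_ definition above) =====
theorem minimal_msearch_response_py_spec : Claim_equal_minimal_msearch_response_py := by
  intro entries _
  unfold Spec_minimal_msearch_response_py minimal_msearch_response_py minimal_msearch_response_py_alt
  rw [PySem.List.foldl_append_singleton_eq_map]
  simp only [pv_elem_eq]
  apply String.ext
  simp [pvObj, pvQ, PySem.Str.join, PySem.Chars.join_cons_cons, PySem.Chars.join_singleton]
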